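-- pv_equiv track=rewrite | github.com/MrBrantCode/unitest_baseline | mut_generate/mist_train_cf/cf_39681/solution.py | execute_commands
-- ===== SOURCE A (Python) =====
-- from typing import List
--
-- def execute_commands(commands: List[str]) -> List[str]:
--     executed_commands = []
--     cargo_doc_executed = False
--
--     for command in commands:
--         if command == "cargo doc":
--             executed_commands.append(command)
--             cargo_doc_executed = True
--         elif command == "rustup component add rustfmt-preview":
--             if cargo_doc_executed:
--                 executed_commands.append(command)
--             else:
--                 # Handle the case where rustfmt-preview is added before cargo doc
--                 pass
--
--     return executed_commands
-- ===== SOURCE B (Python) =====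
-- from typing import List
--
-- def execute_commands(commands: List[str]) -> List[str]:
--     first_idx = None
--     for i, c in enumerate(commands):
--         if c == "cargo doc":
--             first_idx = i
--             break
--     return [c for i, c in enumerate(commands)
--             if c == "cargo doc"
--             or (c == "rustup component add rustfmt-preview"
--                 and first_idx is not None and i > first_idx)]
-- ===== Notes on version B (the rewrite author's own statement) =====
-- stated objective: alternative
-- what changed: Replaces the running boolean flag and explicit accumulator loop with a two-phase shape: first compute the index of the first "cargo doc", then a single index-based comprehension keeps "cargo doc" entries and rustfmt entries strictly after that pivot.
import Mathlib
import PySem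

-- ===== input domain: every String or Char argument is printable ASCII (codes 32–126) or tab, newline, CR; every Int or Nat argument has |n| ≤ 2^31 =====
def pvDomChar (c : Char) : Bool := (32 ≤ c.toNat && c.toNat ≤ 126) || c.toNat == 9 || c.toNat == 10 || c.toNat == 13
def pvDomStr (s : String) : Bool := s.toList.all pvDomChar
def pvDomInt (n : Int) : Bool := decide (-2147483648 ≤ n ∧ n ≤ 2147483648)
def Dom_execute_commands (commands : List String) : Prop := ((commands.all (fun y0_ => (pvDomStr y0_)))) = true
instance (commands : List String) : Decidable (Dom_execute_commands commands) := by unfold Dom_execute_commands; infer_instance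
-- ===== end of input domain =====

-- B replaces A's running boolean flag with a precomputed pivot index (first "cargo doc")
-- and an index-based filter; an alternative decomposition of the same O(n) task.


-- ===== PORT A =====
-- A's loop: accumulator + running flag, appended front-to-back (cons-recursion over the
-- same state; the flag is threaded exactly as in the Python).
def pvLoopA : List String → Bool → List String
  | [], _ => []
  | command :: rest, cargo_doc_executed =>
    if command = "cargo doc" then
      command :: pvLoopA rest true
    else if command = "rustup component add rustfmt-preview" then
      if cargo_doc_executed then command :: pvLoopA rest cargo_doc_executed
      else pvLoopA rest cargo_doc_executed
    else
      pvLoopA rest cargo_doc_executed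

def execute_commands (commands : List String) : List String :=
  pvLoopA commands false

-- ===== PORT B =====
-- phase 1: index of the first "cargo doc" (none if absent)
def pvFirstCargo : List String → Nat → Option Nat
  | [], _ => none
  | c :: rest, i => if c = "cargo doc" then some i else pvFirstCargo rest (i + 1)

-- phase 2: index-based filter over the enumerated list
def pvKeepB (fi : Option Nat) (i : Nat) (c : String) : Bool :=
  c == "cargo doc" ||
    (c == "rustup component add rustfmt-preview" &&
      (match fi with | none => false | some j => decide (j < i)))

def pvFilterB (fi : Option Nat) : List String → Nat → List String
  | [], _ => []
  | c :: rest, i =>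
    if pvKeepB fi i c then c :: pvFilterB fi rest (i + 1)
    else pvFilterB fi rest (i + 1)

def execute_commands_alt (commands : List String) : List String :=
  pvFilterB (pvFirstCargo commands 0) commands 0

-- ===== PRECONDITION & SPEC =====
def Spec_execute_commands (commands : List String) (out : List String) : Prop := out = execute_commands_alt commands
instance (commands : List String) (out : List String) : Decidable (Spec_execute_commands commands out) := by unfold Spec_execute_commands; infer_instance

-- ===== CLAIM (what is proved, stated in full; the proofs are below) =====
def Claim_equal_execute_commands : Prop := ∀ (commands : List String), Dom_execute_commands commands → Spec_execute_commands commands (execute_commands commands)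

-- ===== LEMMAS AND PROOFS =====

-- findCargo only returns indices ≥ its starting counter
theorem pvFirstCargo_ge (l : List String) (i j : Nat) (h : pvFirstCargo l i = some j) : i ≤ j := by
  induction l generalizing i with
  | nil => simp [pvFirstCargo] at h
  | cons c rest ih =>
    simp only [pvFirstCargo] at h
    split at h
    · cases h; omega
    · have := ih (i + 1) h; omega

-- once the pivot is strictly in the past, B's filter behaves as A's loop with the flag set
theorem pvFilterB_flag (l : List String) (j i : Nat) (h : j < i) :
    pvFilterB (some j) l i = pvLoopA l true := by
  induction l generalizing i with
  | nil => rfl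
  | cons c rest ih =>
    simp only [pvFilterB, pvLoopA, pvKeepB]
    by_cases h1 : c = "cargo doc"
    · simp [h1, ih (i + 1) (by omega)]
    · by_cases h2 : c = "rustup component add rustfmt-preview"
      · simp [h2, h, ih (i + 1) (by omega)]
      · simp [h1, h2, ih (i + 1) (by omega)]

-- main invariant: before the pivot, A's flag is false and B searches from the counter
theorem pvLoopA_eq_filterB (l : List String) (i : Nat) :
    pvLoopA l false = pvFilterB (pvFirstCargo l i) l i := by
  induction l generalizing i with
  | nil => rfl
  | cons c rest ih =>
    simp only [pvLoopA, pvFirstCargo, pvFilterB, pvKeepB]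
    by_cases h1 : c = "cargo doc"
    · simp [h1, pvFilterB_flag rest i (i + 1) (by omega)]
    · by_cases h2 : c = "rustup component add rustfmt-preview"
      · -- rustfmt before any cargo doc: B's pivot (if any) lies at index ≥ i+1, so keep = false
        cases hfi : pvFirstCargo rest (i + 1) with
        | none => simp [h2, hfi, ih (i + 1)]
        | some j =>
          have hij : i + 1 ≤ j := pvFirstCargo_ge _ _ _ hfi
          have : ¬ (j < i) := by omega
          simp [h2, hfi, this, ih (i + 1)]
      · simp [h1, h2, ih (i + 1)]

-- ===== VERDICT (by name: the statement is the Claim_ definition above) =====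
theorem execute_commands_spec : Claim_equal_execute_commands := by
  intro commands _
  unfold Spec_execute_commands execute_commands execute_commands_alt
  exact pvLoopA_eq_filterB commands 0
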